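-- pv_equiv track=rewrite | github.com/DataWhisk/hvac-occupancy-forecasting | src/data/load.py | _dedupe_columns
-- ===== SOURCE A (Python) =====
-- from typing import Dict, List, Optional, Sequence
--
-- def _dedupe_columns(columns: List[str]) -> List[str]:
--     """
--     Make duplicate column names unique while preserving original order.
--
--     Example:
--       ["A", "B", "A"] -> ["A", "B", "A__dup2"]
--     """
--     seen = {}
--     out = []
--     for col in columns:
--         count = seen.get(col, 0) + 1
--         seen[col] = count
--         out.append(col if count == 1 else f"{col}__dup{count}")
--     return out
-- ===== SOURCE B (Python) =====
-- def _dedupe_columns(columns):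
--     """Group-then-scatter: first index every name by the list of ALL its
--     positions, then fill a preallocated output array, writing each group's
--     occupants with their 1-based rank within the group."""
--     positions = {}
--     for i, col in enumerate(columns):
--         positions.setdefault(col, []).append(i)
--     out = [""] * len(columns)
--     for col, idxs in positions.items():
--         for k, i in enumerate(idxs, 1):
--             out[i] = col if k == 1 else f"{col}__dup{k}"
--     return out
-- ===== Notes on version B (the rewrite author's own statement) =====
-- stated objective: alternative
-- what changed: Replaced the single pass with a running per-name counter by a two-stage group-then-scatter algorithm: one pass indexes every name by the list of all its positions, a second pass scatter-assigns each group's occurrences (ranked 1..k within the group) into a preallocated output array.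
import Mathlib
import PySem

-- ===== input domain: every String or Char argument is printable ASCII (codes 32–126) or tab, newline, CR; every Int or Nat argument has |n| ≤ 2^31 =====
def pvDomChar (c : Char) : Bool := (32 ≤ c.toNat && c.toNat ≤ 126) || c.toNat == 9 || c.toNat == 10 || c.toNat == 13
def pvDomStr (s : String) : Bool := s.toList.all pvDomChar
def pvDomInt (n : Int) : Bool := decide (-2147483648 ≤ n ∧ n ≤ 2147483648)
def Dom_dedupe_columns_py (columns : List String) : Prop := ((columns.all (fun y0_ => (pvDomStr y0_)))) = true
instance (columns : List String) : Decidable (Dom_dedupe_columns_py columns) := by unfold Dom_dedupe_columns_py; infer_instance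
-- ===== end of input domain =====

-- B replaces A's single pass with a running seen-dict by a two-stage group-then-scatter
-- algorithm (index every name by its positions, then scatter-assign ranked entries);
-- objective: alternative (same cost, different algorithm).

-- ===== PORT A =====
def dedupe_columns_py (columns : List String) : List String :=
  (columns.foldl
    (fun (st : PySem.Dict String Int × List String) col =>
      let count := st.1.getD col 0 + 1
      let seen := st.1.insert col count
      (seen, st.2 ++ [if count = 1 then col else col ++ "__dup" ++ PySem.Int.toStr count]))
    ((PySem.Dict.empty : PySem.Dict String Int), ([] : List String))).2

-- ===== PORT B =====
-- 'positions.setdefault(col, []).append(i)' is 'positions[col] = positions.get(col, []) + [i]', i.e. Dict.modify.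
-- 'out[i] = v' is ported with pySetD: every stored index i satisfies 0 ≤ i < len(out), so it is exact here.
def dedupe_columns_py_alt (columns : List String) : List String :=
  let positions : PySem.Dict String (List Int) :=
    (PySem.List.enumerate columns).foldl
      (fun d ic => d.modify ic.2 [] (fun l => l ++ [ic.1])) PySem.Dict.empty
  let out0 : List String := List.replicate columns.length ""
  positions.items.foldl
    (fun out ci =>
      (PySem.List.enumerate ci.2 1).foldl
        (fun out ki =>
          PySem.List.pySetD out ki.2
            (if ki.1 = 1 then ci.1 else ci.1 ++ "__dup" ++ PySem.Int.toStr ki.1))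
        out)
    out0

-- ===== PRECONDITION & SPEC =====
def Spec_dedupe_columns_py (columns : List String) (out : List String) : Prop := out = dedupe_columns_py_alt columns
instance (columns : List String) (out : List String) : Decidable (Spec_dedupe_columns_py columns out) := by unfold Spec_dedupe_columns_py; infer_instance

-- ===== CLAIM (what is proved, stated in full; the proofs are below) =====
def Claim_equal_dedupe_columns_py : Prop := ∀ (columns : List String), Dom_dedupe_columns_py columns → Spec_dedupe_columns_py columns (dedupe_columns_py columns)

-- ===== LEMMAS AND PROOFS =====

-- the common specification value at position q
def pvVal (columns : List String) (q : Nat) : String :=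
  let c := columns.getD q ""
  let k := (columns.take (q + 1)).count c
  if k = 1 then c else c ++ "__dup" ++ PySem.Int.toStr (k : Int)

-- A-side rendering by prefix
def pvRender (pre : List String) : List String → List String
  | [] => []
  | c :: cs =>
      (if pre.count c + 1 = 1 then c
       else c ++ "__dup" ++ PySem.Int.toStr ((pre.count c : Int) + 1))
        :: pvRender (pre ++ [c]) cs

theorem pvA_fold (l : List String) : ∀ (seen : PySem.Dict String Int) (out pre : List String),
    (∀ c, seen.getD c 0 = (pre.count c : Int)) →
    (l.foldl
      (fun (st : PySem.Dict String Int × List String) col =>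
        let count := st.1.getD col 0 + 1
        let seen := st.1.insert col count
        (seen, st.2 ++ [if count = 1 then col else col ++ "__dup" ++ PySem.Int.toStr count]))
      (seen, out)).2 = out ++ pvRender pre l := by
  induction l with
  | nil => intro seen out pre h; simp [pvRender]
  | cons c cs ih =>
    intro seen out pre h
    simp only [List.foldl_cons]
    have hc : seen.getD c 0 + 1 = ((pre.count c : Int) + 1) := by rw [h]
    have step : (seen.insert c (seen.getD c 0 + 1), out ++ [if seen.getD c 0 + 1 = 1 then c else c ++ "__dup" ++ PySem.Int.toStr (seen.getD c 0 + 1)])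
        = (seen.insert c (seen.getD c 0 + 1),
           out ++ [if pre.count c + 1 = 1 then c else c ++ "__dup" ++ PySem.Int.toStr ((pre.count c : Int) + 1)]) := by
      rw [hc]; simp
    rw [step, ih (seen.insert c (seen.getD c 0 + 1)) _ (pre ++ [c]) ?_]
    · simp [pvRender]
    · intro c'
      rw [PySem.Dict.getD_insert, hc]
      by_cases hcc : c' = c
      · subst hcc; simp [List.count_append]
      · simp [hcc, h c', List.count_append, List.count_singleton]
        simp [Ne.symm hcc]

theorem pvRender_get? (l : List String) : ∀ (pre : List String) (m : Nat),
    (pvRender pre l)[m]? = if m < l.length then some (pvVal (pre ++ l) (pre.length + m)) else none := by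
  induction l with
  | nil => intro pre m; simp [pvRender]
  | cons c cs ih =>
    intro pre m
    cases m with
    | zero =>
      simp only [pvRender, List.getElem?_cons_zero, List.length_cons]
      have hc : (pre ++ c :: cs).getD pre.length "" = c := by
        simp [List.getD]
      have htake : (pre ++ c :: cs).take (pre.length + 0 + 1) = pre ++ [c] := by
        rw [show (c :: cs) = [c] ++ cs from rfl, ← List.append_assoc]
        rw [show pre.length + 0 + 1 = (pre ++ [c]).length by simp]
        exact List.take_left
      simp only [pvVal, Nat.add_zero] at *
      rw [if_pos (Nat.succ_pos _)]
      rw [hc] at *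
      rw [htake]
      simp [List.count_append]
    | succ m =>
      simp only [pvRender, List.getElem?_cons_succ, List.length_cons]
      rw [ih (pre ++ [c]) m]
      have h1 : pre ++ [c] ++ cs = pre ++ c :: cs := by simp
      have h2 : (pre ++ [c]).length + m = pre.length + (m + 1) := by simp; omega
      rw [h1, h2]
      simp

theorem length_pvRender (l : List String) : ∀ pre, (pvRender pre l).length = l.length := by
  induction l with
  | nil => intro pre; simp [pvRender]
  | cons c cs ih => intro pre; simp [pvRender, ih]

-- B-side: the position list of a name, walking the columns with a running index
def pvF (c : String) : List String → Int → List Int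
  | [], _ => []
  | x :: xs, s => if x = c then s :: pvF c xs (s + 1) else pvF c xs (s + 1)

theorem pvF_eq (c : String) (l : List String) : ∀ (s : Int),
    ((PySem.List.enumerate l s).filter (fun ic => ic.2 == c)).map (·.1) = pvF c l s := by
  induction l with
  | nil => intro s; simp [PySem.List.enumerate_nil, pvF]
  | cons x xs ih =>
    intro s
    rw [PySem.List.enumerate_cons]
    by_cases hx : x = c
    · simp [pvF, hx, ih]
    · simp [pvF, hx, ih]

theorem pvF_getElem (c : String) (l : List String) : ∀ (s m : Nat) (hm : m < (pvF c l (s : Int)).length),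
    ∃ t : Nat, ∃ ht : t < l.length, (pvF c l (s : Int))[m] = ((s + t : Nat) : Int) ∧
      l[t] = c ∧ (l.take (t + 1)).count c = m + 1 := by
  induction l with
  | nil => intro s m hm; simp [pvF] at hm
  | cons x xs ih =>
    intro s m hm
    by_cases hx : x = c
    · simp only [pvF, if_pos hx] at hm ⊢
      cases m with
      | zero =>
        exact ⟨0, Nat.succ_pos _, by simp, hx, by simp [hx]⟩
      | succ m =>
        have hm' : m < (pvF c xs ((s : Int) + 1)).length := by
          simpa using hm
        have hcast : ((s : Int) + 1) = ((s + 1 : Nat) : Int) := by push_cast; ring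
        simp only [hcast] at hm' ⊢
        obtain ⟨t, ht, he, hc2, hcnt⟩ := ih (s + 1) m hm'
        refine ⟨t + 1, by simp; omega, ?_, by simpa using hc2, ?_⟩
        · simp only [List.getElem_cons_succ, he]; congr 1; omega
        · rw [List.take_succ_cons, List.count_cons]
          simp [hx, hcnt]
    · simp only [pvF, if_neg hx] at hm ⊢
      have hcast : ((s : Int) + 1) = ((s + 1 : Nat) : Int) := by push_cast; ring
      simp only [hcast] at hm ⊢
      obtain ⟨t, ht, he, hc2, hcnt⟩ := ih (s + 1) m hm
      refine ⟨t + 1, by simp; omega, ?_, by simpa using hc2, ?_⟩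
      · rw [he]; congr 1; omega
      · rw [List.take_succ_cons, List.count_cons]
        simp [hx, hcnt]

theorem pvF_mem (c : String) (l : List String) : ∀ (s : Nat) (j : Int),
    j ∈ pvF c l (s : Int) ↔ ∃ t : Nat, ∃ _ : t < l.length, j = ((s + t : Nat) : Int) ∧ l[t] = c := by
  induction l with
  | nil => intro s j; simp [pvF]
  | cons x xs ih =>
    intro s j
    have hcast : ((s : Int) + 1) = ((s + 1 : Nat) : Int) := by push_cast; ring
    constructor
    · intro hj
      by_cases hx : x = c
      · simp only [pvF, if_pos hx, List.mem_cons] at hj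
        rcases hj with hj | hj
        · exact ⟨0, Nat.succ_pos _, by simp [hj], hx⟩
        · rw [hcast] at hj
          obtain ⟨t, ht, he, hc2⟩ := (ih (s + 1) j).1 hj
          refine ⟨t + 1, by simp; omega, ?_, by simpa using hc2⟩
          rw [he]; congr 1; omega
      · simp only [pvF, if_neg hx] at hj; rw [hcast] at hj
        obtain ⟨t, ht, he, hc2⟩ := (ih (s + 1) j).1 hj
        refine ⟨t + 1, by simp; omega, ?_, by simpa using hc2⟩
        rw [he]; congr 1; omega
    · rintro ⟨t, ht, he, hc2⟩
      cases t with
      | zero =>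
        simp only [List.getElem_cons_zero] at hc2
        rw [pvF, if_pos hc2]
        simp [he]
      | succ t =>
        have : j ∈ pvF c xs ((s + 1 : Nat) : Int) := by
          refine (ih (s + 1) j).2 ⟨t, by simp at ht ⊢; omega, ?_, by simpa using hc2⟩
          rw [he]; congr 1; omega
        by_cases hx : x = c
        · simp only [pvF, if_pos hx]; rw [hcast]; exact List.mem_cons_of_mem _ this
        · simp only [pvF, if_neg hx]; rw [hcast]; exact this

-- the inner scatter loop: writes pvVal at every listed position, leaves the rest alone
theorem pvInner (columns : List String) (c : String) :
    ∀ (pairs : List (Int × Int)),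
    (∀ p ∈ pairs, ∃ jn : Nat, p.2 = (jn : Int) ∧ jn < columns.length ∧
        (if p.1 = 1 then c else c ++ "__dup" ++ PySem.Int.toStr p.1) = pvVal columns jn) →
    ∀ (out : List String), out.length = columns.length →
      (pairs.foldl
        (fun out ki =>
          PySem.List.pySetD out ki.2
            (if ki.1 = 1 then c else c ++ "__dup" ++ PySem.Int.toStr ki.1)) out).length = columns.length ∧
      ∀ q : Nat, q < columns.length →
        (pairs.foldl
          (fun out ki =>
            PySem.List.pySetD out ki.2
              (if ki.1 = 1 then c else c ++ "__dup" ++ PySem.Int.toStr ki.1)) out)[q]? =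
          if (q : Int) ∈ pairs.map (·.2) then some (pvVal columns q) else out[q]? := by
  intro pairs
  induction pairs with
  | nil => intro _ out hlen; exact ⟨hlen, fun q hq => by simp⟩
  | cons p ps ih =>
    intro hp out hlen
    obtain ⟨jn, hj, hjlt, hv⟩ := hp p (List.mem_cons_self)
    have hstep : PySem.List.pySetD out p.2
        (if p.1 = 1 then c else c ++ "__dup" ++ PySem.Int.toStr p.1) = out.set jn (pvVal columns jn) := by
      rw [hj, PySem.List.pySetD_natCast, hv]
    rw [List.foldl_cons, hstep]
    have hlen' : (out.set jn (pvVal columns jn)).length = columns.length := by simp [hlen]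
    obtain ⟨hL, hG⟩ := ih (fun p hp' => hp p (List.mem_cons_of_mem _ hp')) _ hlen'
    refine ⟨hL, fun q hq => ?_⟩
    rw [hG q hq]
    simp only [List.map_cons, List.mem_cons, hj]
    by_cases hmem : (q : Int) ∈ ps.map (·.2)
    · simp [hmem]
    · by_cases hqj : q = jn
      · subst hqj
        simp [hmem, hlen ▸ hq]
      · have hne : (q : Int) ≠ (jn : Int) := by exact_mod_cast hqj
        simp [hmem, hne, List.getElem?_set_ne (fun h => hqj h.symm)]

-- the outer loop over the grouped dict items
theorem pvOuter (columns : List String) :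
    ∀ (ks : List String) (out : List String), out.length = columns.length →
      ((ks.map (fun c => (c, pvF c columns 0))).foldl
        (fun out ci =>
          (PySem.List.enumerate ci.2 1).foldl
            (fun out ki =>
              PySem.List.pySetD out ki.2
                (if ki.1 = 1 then ci.1 else ci.1 ++ "__dup" ++ PySem.Int.toStr ki.1))
            out) out).length = columns.length ∧
      ∀ q : Nat, (hq : q < columns.length) →
        ((ks.map (fun c => (c, pvF c columns 0))).foldl
          (fun out ci =>
            (PySem.List.enumerate ci.2 1).foldl
              (fun out ki =>
                PySem.List.pySetD out ki.2
                  (if ki.1 = 1 then ci.1 else ci.1 ++ "__dup" ++ PySem.Int.toStr ki.1))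
              out) out)[q]? =
          if columns[q] ∈ ks then some (pvVal columns q) else out[q]? := by
  intro ks
  induction ks with
  | nil => intro out hlen; exact ⟨by simpa using hlen, fun q hq => by simp⟩
  | cons c cs ih =>
    intro out hlen
    have hz : (0 : Int) = ((0 : Nat) : Int) := rfl
    have hpairs : ∀ p ∈ PySem.List.enumerate (pvF c columns 0) 1,
        ∃ jn : Nat, p.2 = (jn : Int) ∧ jn < columns.length ∧
          (if p.1 = 1 then c else c ++ "__dup" ++ PySem.Int.toStr p.1) = pvVal columns jn := by
      intro p hpmem
      rw [PySem.List.mem_enumerate_iff] at hpmem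
      obtain ⟨m, hm, hpe⟩ := hpmem
      rw [hz] at hm
      obtain ⟨t, ht, he, hc2, hcnt⟩ := pvF_getElem c columns 0 m (by simpa using hm)
      refine ⟨t, ?_, ht, ?_⟩
      · rw [hpe]; simpa using he
      · rw [hpe]
        have hgd : columns.getD t "" = c := by
          simp [List.getD, List.getElem?_eq_getElem ht, hc2]
        simp only [pvVal, hgd, hcnt]
        by_cases hm1 : m = 0
        · subst hm1; simp
        · have h1 : ¬ ((1 : Int) + (m : Int) = 1) := by omega
          have h2 : ¬ (m + 1 = 1) := by omega
          rw [if_neg h1, if_neg h2]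
          have hc3 : (1 : Int) + (m : Int) = ((m + 1 : Nat) : Int) := by push_cast; ring
          rw [hc3]
    rw [List.map_cons, List.foldl_cons]
    obtain ⟨hL1, hG1⟩ := pvInner columns c (PySem.List.enumerate (pvF c columns 0) 1) hpairs out hlen
    obtain ⟨hL2, hG2⟩ := ih _ hL1
    refine ⟨hL2, fun q hq => ?_⟩
    rw [hG2 q hq, hG1 q hq]
    rw [PySem.List.map_snd_enumerate]
    have hmemf : (q : Int) ∈ pvF c columns 0 ↔ columns[q] = c := by
      rw [hz, pvF_mem]
      constructor
      · rintro ⟨t, ht, he, hc2⟩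
        have hq0 : q = 0 + t := by exact_mod_cast he
        have : q = t := by omega
        subst this; exact hc2
      · intro h; exact ⟨q, hq, by simp, h⟩
    by_cases hcs : columns[q] ∈ cs
    · simp [hcs]
    · by_cases hcc : columns[q] = c
      · simp [hcc, hmemf.2 hcc]
      · have : ¬ ((q : Int) ∈ pvF c columns 0) := fun h => hcc (hmemf.1 h)
        simp [hcs, hcc, this]

-- the grouping pass builds exactly (name ↦ pvF name columns 0)
theorem pvPositions (columns : List String) :
    ((PySem.List.enumerate columns).foldl
      (fun d ic => d.modify ic.2 [] (fun l => l ++ [ic.1])) PySem.Dict.empty).items =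
    (PySem.Set.ofList columns).map (fun c => (c, pvF c columns 0)) := by
  set d := (PySem.List.enumerate columns).foldl
      (fun d ic => d.modify ic.2 [] (fun l => l ++ [ic.1])) PySem.Dict.empty with hd
  have hnodup : d.keys.Nodup := by
    rw [hd]
    exact PySem.Dict.nodup_keys_foldl_modify_key _ _ _ _ _ PySem.Dict.nodup_keys_empty
  have hkeys : d.keys = PySem.Set.ofList columns := by
    rw [hd, PySem.Dict.keys_foldl_modify_key, PySem.Dict.keys_empty,
      PySem.List.map_snd_enumerate]
    rfl
  have hgetD : ∀ c, d.getD c [] = pvF c columns 0 := by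
    intro c
    rw [hd]
    have hfold : d = ((PySem.List.enumerate columns).map (fun ic => (ic.2, ic.1))).foldl
        (fun (d : PySem.Dict String (List Int)) (p : String × Int) =>
          d.modify p.1 [] (fun l => l ++ [p.2])) PySem.Dict.empty := by
      rw [hd]; exact (List.foldl_map (f := fun (ic : Int × String) => (ic.2, ic.1)) (g := fun (d : PySem.Dict String (List Int)) (p : String × Int) => d.modify p.1 [] (fun l => l ++ [p.2]))).symm
    rw [← hd, hfold, PySem.Dict.getD_foldl_modify_append, PySem.Dict.getD_empty]
    rw [List.filter_map, List.map_map]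
    rw [← pvF_eq c columns 0]
    congr 1
  rw [PySem.Dict.items_eq_map_keys d hnodup []]
  rw [hkeys]
  exact List.map_congr_left (fun c _ => by rw [hgetD c])

-- ===== VERDICT (by name: the statement is the Claim_ definition above) =====
theorem dedupe_columns_py_spec : Claim_equal_dedupe_columns_py := by
  intro columns _
  unfold Spec_dedupe_columns_py dedupe_columns_py dedupe_columns_py_alt
  rw [pvA_fold columns PySem.Dict.empty [] [] (by intro c; simp [PySem.Dict.getD_empty])]
  rw [List.nil_append]
  simp only [pvPositions columns]
  obtain ⟨hL, hG⟩ := pvOuter columns (PySem.Set.ofList columns)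
      (List.replicate columns.length "") (by simp)
  apply List.ext_getElem?
  intro q
  by_cases hq : q < columns.length
  · rw [hG q hq, pvRender_get? columns [] q]
    have hmem : columns[q] ∈ PySem.Set.ofList columns :=
      (PySem.Set.mem_ofList _ _).2 (List.getElem_mem hq)
    simp [hq, hmem]
  · rw [List.getElem?_eq_none (by rw [length_pvRender]; omega),
      List.getElem?_eq_none (by rw [hL]; omega)]
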